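-- pv_equiv track=rewrite | github.com/kimkihoon0515/CodingTest | 프로그래머스/실전모의고사/2번.py | solution
-- ===== SOURCE A (Python) =====
-- from collections import Counter
--
-- def solution(want, number, discount):
--     answer = 0
--
--     w = {}
--
--     for i in range(len(want)):
--         w[want[i]] = number[i]
--
--     for start in range(len(discount)):
--         flag = True
--         end = start + 10
--         if end>len(discount):
--             end = len(discount)
--         hash = Counter(discount[start:end])
--
--
--         for key,value in w.items():
--             if key not in hash:
--                 flag = False
--                 break
--
--             else:
--                 if key in hash and value>hash[key]:
--                     flag = False
--                     break
--         if flag: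
--             answer+=1
--
--     return answer
-- ===== SOURCE B (Python) =====
-- def _add(thr, cnt, met, d):
--     if d in thr:
--         c = cnt.get(d, 0) + 1
--         cnt[d] = c
--         if c == thr[d]:
--             met += 1
--     return met
--
-- def _rem(thr, cnt, met, d):
--     if d in thr:
--         c = cnt.get(d, 0) - 1
--         cnt[d] = c
--         if c == thr[d] - 1:
--             met -= 1
--     return met
--
-- def solution(want, number, discount):
--     w = dict(zip(want, number))
--     thr = {k: max(q, 1) for k, q in w.items()}
--     n = len(discount)
--     cnt = {}
--     met = 0
--     for j in range(min(10, n)):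
--         met = _add(thr, cnt, met, discount[j])
--     answer = 0
--     for s in range(n):
--         if met == len(thr):
--             answer += 1
--         met = _rem(thr, cnt, met, discount[s])
--         if s + 10 < n:
--             met = _add(thr, cnt, met, discount[s + 10])
--     return answer
-- ===== Notes on version B (the rewrite author's own statement) =====
-- stated objective: faster
-- what changed: B replaces A's per-start Counter of each 10-element slice and dict-membership/threshold scan by a single sliding window: one running counter plus a count 'met' of satisfied wanted items, updated in O(1) per start.
import Mathlib
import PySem

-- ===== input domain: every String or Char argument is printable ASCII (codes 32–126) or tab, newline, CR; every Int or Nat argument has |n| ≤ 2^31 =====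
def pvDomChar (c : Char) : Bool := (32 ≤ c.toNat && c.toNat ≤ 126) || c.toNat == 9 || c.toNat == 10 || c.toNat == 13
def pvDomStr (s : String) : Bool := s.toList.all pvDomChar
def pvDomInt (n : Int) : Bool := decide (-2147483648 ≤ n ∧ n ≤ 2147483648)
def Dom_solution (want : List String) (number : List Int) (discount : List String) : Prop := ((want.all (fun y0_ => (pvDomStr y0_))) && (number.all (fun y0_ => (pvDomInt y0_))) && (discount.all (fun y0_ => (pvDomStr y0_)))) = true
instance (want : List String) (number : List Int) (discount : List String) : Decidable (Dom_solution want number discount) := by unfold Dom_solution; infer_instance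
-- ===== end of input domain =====

-- B replaces A's per-start Counter of each 10-slice by one sliding window (a running counter
-- plus a count 'met' of satisfied wanted items), removing the per-start rebuild (faster).

-- ===== PORT A =====
-- the inner 'for key,value in w.items()' loop with its two 'break's
def checkA (h : PySem.Dict String Int) : List (String × Int) → Bool
  | [] => true
  | (k, v) :: rest =>
    if !(h.contains k) then false
    else if h.contains k && decide (v > h.getD k 0) then false
    else checkA h rest

def solution (want : List String) (number : List Int) (discount : List String) : Int :=
  -- number[i] raises IndexError when len(number) < len(want); Pre_solution excludes that,
  -- so the default 0 of pyGetD is never read on admitted inputs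
  let w := (PySem.List.pyRange 0 (PySem.List.len want)).foldl
      (fun d i => d.insert (PySem.List.pyGetD want i "") (PySem.List.pyGetD number i 0))
      PySem.Dict.empty
  (PySem.List.pyRange 0 (PySem.List.len discount)).foldl (fun answer start =>
    let e0 : Int := start + 10
    let e : Int := if e0 > PySem.List.len discount then PySem.List.len discount else e0
    let hash := PySem.Dict.counter (PySem.List.slice discount (some start) (some e))
    if checkA hash w.items then answer + 1 else answer) 0

-- ===== PORT B =====
-- _add(thr, cnt, met, d) of Source B; the window indices it reads are always in range,
-- so cnt.get(d, 0) is ported exactly by Dict.getD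
def addE (thr : PySem.Dict String Int) (st : PySem.Dict String Int × Int) (d : String) :
    PySem.Dict String Int × Int :=
  if thr.contains d then
    let c := st.1.getD d 0 + 1
    (st.1.insert d c, if c == thr.getD d 0 then st.2 + 1 else st.2)
  else st

-- _rem(thr, cnt, met, d) of Source B
def remE (thr : PySem.Dict String Int) (st : PySem.Dict String Int × Int) (d : String) :
    PySem.Dict String Int × Int :=
  if thr.contains d then
    let c := st.1.getD d 0 - 1
    (st.1.insert d c, if c == thr.getD d 0 - 1 then st.2 - 1 else st.2)
  else st

def solution_alt (want : List String) (number : List Int) (discount : List String) : Int :=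
  let w := PySem.Dict.ofList (want.zip number)
  let thr := w.items.foldl (fun (t : PySem.Dict String Int) p => t.insert p.1 (max p.2 1))
      PySem.Dict.empty
  let n : Int := PySem.List.len discount
  -- discount[j] for 0 ≤ j < min(10, n) and for s, s+10 < n is always in range,
  -- so pyGetD's default "" is never read
  let st0 := (PySem.List.pyRange 0 (min 10 n)).foldl
      (fun st j => addE thr st (PySem.List.pyGetD discount j "")) (PySem.Dict.empty, 0)
  let res := (PySem.List.pyRange 0 n).foldl
      (fun (acc : Int × (PySem.Dict String Int × Int)) s =>
        let acc1 := if acc.2.2 == ((PySem.Dict.size thr : Nat) : Int) then acc.1 + 1 else acc.1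
        let st1 := remE thr acc.2 (PySem.List.pyGetD discount s "")
        let st2 := if s + 10 < n then addE thr st1 (PySem.List.pyGetD discount (s + 10) "")
          else st1
        (acc1, st2)) (0, st0)
  res.1

-- ===== PRECONDITION & SPEC =====
-- A indexes number[i] for every i < len(want), raising IndexError when number is shorter:
-- exactly those crashing inputs are excluded (B's zip would truncate instead).
def Pre_solution (want : List String) (number : List Int) (discount : List String) : Prop :=
  want.length ≤ number.length
instance (want : List String) (number : List Int) (discount : List String) : Decidable (Pre_solution want number discount) := by unfold Pre_solution; infer_instance

def pvWitness_solution : List String × List Int × List String := (["a"], [1], ["a", "b", "a"])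

def Spec_solution (want : List String) (number : List Int) (discount : List String) (out : Int) : Prop := out = solution_alt want number discount
instance (want : List String) (number : List Int) (discount : List String) (out : Int) : Decidable (Spec_solution want number discount out) := by unfold Spec_solution; infer_instance

-- ===== CLAIM (what is proved, stated in full; the proofs are below) =====
def Claim_equal_solution : Prop := ∀ (want : List String) (number : List Int) (discount : List String), Dom_solution want number discount → Pre_solution want number discount → Spec_solution want number discount (solution want number discount)

-- ===== LEMMAS AND PROOFS =====

-- A's inner loop is the 'all' of its per-key test
theorem checkA_eq_all (h : PySem.Dict String Int) (l : List (String × Int)) :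
    checkA h l = l.all (fun p => h.contains p.1 && decide (p.2 ≤ h.getD p.1 0)) := by
  induction l with
  | nil => rfl
  | cons p rest ih =>
    obtain ⟨k, v⟩ := p
    simp only [checkA, List.all_cons, ih]
    by_cases hc : h.contains k
    · by_cases hv : v ≤ h.getD k 0
      · simp [hc, hv, show ¬ (v > h.getD k 0) from by omega]
      · simp [hc, hv, show v > h.getD k 0 from by omega]
    · simp [hc]

-- the dict A builds by index equals dict(zip(want, number))
theorem dict_eq (want : List String) (number : List Int)
    (hlen : want.length ≤ number.length) :
    (PySem.List.pyRange 0 (PySem.List.len want)).foldl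
      (fun d i => d.insert (PySem.List.pyGetD want i "") (PySem.List.pyGetD number i 0))
      PySem.Dict.empty
    = PySem.Dict.ofList (want.zip number) := by
  have hzlen : (want.zip number).length = want.length := by
    simp [List.length_zip]; omega
  have hcong : ∀ (d : PySem.Dict String Int), ∀ i ∈ PySem.List.pyRange 0 (PySem.List.len want),
      d.insert (PySem.List.pyGetD want i "") (PySem.List.pyGetD number i 0)
      = (fun (d : PySem.Dict String Int) (p : String × Int) => d.insert p.1 p.2) d
          (PySem.List.pyGetD (want.zip number) i ("", 0)) := by
    intro d i hi
    rw [PySem.List.mem_pyRange_one] at hi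
    obtain ⟨h0, hlt⟩ := hi
    obtain ⟨j, rfl⟩ := Int.eq_ofNat_of_zero_le h0
    have hj : j < want.length := by
      simp only [PySem.List.len] at hlt; exact_mod_cast hlt
    have hjz : j < (want.zip number).length := by omega
    have hjn : j < number.length := by omega
    simp only [PySem.List.pyGetD_natCast]
    rw [List.getD_eq_getElem _ _ hjz, List.getD_eq_getElem _ _ hj,
      List.getD_eq_getElem _ _ hjn, List.getElem_zip]
  rw [PySem.List.foldl_congr_mem _ _ _ _ hcong]
  have hl : PySem.List.len want = PySem.List.len (want.zip number) := by
    simp [PySem.List.len, hzlen]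
  rw [hl]
  exact (PySem.List.foldl_pyRange_pyGetD (want.zip number) ("", 0)
    (fun (d : PySem.Dict String Int) (p : String × Int) => d.insert p.1 p.2)
    PySem.Dict.empty (le_refl 0)).trans (by rfl)

-- the window of start s
def winAt (discount : List String) (s : Nat) : List String :=
  (discount.take (min (s + 10) discount.length)).drop s

-- B's per-key satisfaction test (thr already carries max(q,1))
def satB (win : List String) (p : String × Int) : Bool :=
  decide (p.2 ≤ (List.count p.1 win : Int))

-- the sliding-window invariant: cnt tracks the window count of every thr key
-- and met is the number of satisfied thr entries
def InvD (thr : PySem.Dict String Int) (win : List String)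
    (st : PySem.Dict String Int × Int) : Prop :=
  (∀ k : String, thr.contains k = true → st.1.getD k 0 = (List.count k win : Int)) ∧
  st.2 = (thr.items.countP (satB win) : Int)

-- countP after a change that affects only the (unique) entry with key x
theorem countP_point (items : List (String × Int)) (x : String) (v : Int)
    (hnd : (items.map (fun p => p.1)).Nodup) (hmem : (x, v) ∈ items)
    (f g : String × Int → Bool)
    (hsame : ∀ p ∈ items, p.1 ≠ x → g p = f p) :
    (items.countP g : Int)
      = (items.countP f : Int)
        + ((if g (x, v) then 1 else 0) - (if f (x, v) then 1 else 0)) := by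
  induction items with
  | nil => simp at hmem
  | cons p rest ih =>
    simp only [List.map_cons, List.nodup_cons] at hnd
    obtain ⟨hp1, hnd'⟩ := hnd
    rcases List.mem_cons.mp hmem with heq | hmem'
    · subst heq
      have hrest : rest.countP g = rest.countP f := by
        apply List.countP_congr
        intro q hq
        have hqx : q.1 ≠ x := by
          intro hqx
          exact hp1 (by simpa [hqx] using List.mem_map_of_mem (f := fun p => p.1) hq)
        rw [hsame q (List.mem_cons_of_mem _ hq) hqx]
      rw [List.countP_cons, List.countP_cons, hrest]
      split_ifs <;> push_cast <;> omega
    · have hx_rest : x ∈ rest.map (fun p => p.1) := by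
        simpa using List.mem_map_of_mem (f := fun p => p.1) hmem'
      have hpx : p.1 ≠ x := fun h => hp1 (h ▸ hx_rest)
      have hgp : g p = f p := hsame p (List.mem_cons_self) hpx
      have := ih hnd' hmem' (fun q hq => hsame q (List.mem_cons_of_mem _ hq))
      rw [List.countP_cons, List.countP_cons, hgp]
      split_ifs at this ⊢ <;> push_cast at this ⊢ <;> omega

theorem contains_iff_mem_items (d : PySem.Dict String Int) (k : String) :
    d.contains k = true ↔ ∃ v, (k, v) ∈ d.items := by
  unfold PySem.Dict.contains
  rw [List.any_eq_true]
  constructor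
  · rintro ⟨p, hp, hbeq⟩
    exact ⟨p.2, by have : p.1 = k := by simpa using hbeq
                   simpa [← this] using hp⟩
  · rintro ⟨v, hv⟩
    exact ⟨(k, v), hv, by simp⟩

theorem addE_inv (thr : PySem.Dict String Int) (hnd : thr.keys.Nodup)
    (win : List String) (st : PySem.Dict String Int × Int) (x : String)
    (h : InvD thr win st) : InvD thr (win ++ [x]) (addE thr st x) := by
  obtain ⟨hc, hm⟩ := h
  unfold addE
  by_cases hx : thr.contains x = true
  · rw [if_pos hx]
    constructor
    · intro k hk
      rw [PySem.Dict.getD_insert]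
      by_cases hkx : k = x
      · subst hkx
        rw [if_pos rfl, hc k hx, List.count_append]
        simp
      · rw [if_neg hkx, hc k hk, List.count_append]
        have : List.count k [x] = 0 := by
          simp [List.count_singleton]
          exact fun h => hkx h.symm
        omega
    · obtain ⟨v, hv⟩ := (contains_iff_mem_items thr x).mp hx
      have hvv : thr.getD x 0 = v := PySem.Dict.getD_of_mem_items thr hv hnd 0
      have hsame : ∀ p ∈ thr.items, p.1 ≠ x → satB (win ++ [x]) p = satB win p := by
        intro p _ hpx
        unfold satB
        rw [List.count_append, show List.count p.1 [x] = 0 from by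
          simp [List.count_singleton]; exact fun h => hpx h.symm]
        simp
      rw [countP_point thr.items x v hnd hv (satB win) (satB (win ++ [x])) hsame, ← hm,
        hc x hx, hvv]
      unfold satB
      have hcount : List.count x (win ++ [x]) = List.count x win + 1 := by
        rw [List.count_append]; simp
      rw [hcount]
      push_cast
      split_ifs with h1 h2 h3 <;> simp_all <;> omega
  · rw [if_neg hx]
    refine ⟨?_, ?_⟩
    · intro k hk
      have hkx : k ≠ x := fun h => hx (h ▸ hk)
      rw [hc k hk, List.count_append, show List.count k [x] = 0 from by
        simp [List.count_singleton]; exact fun h => hkx h.symm]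
      simp
    · rw [hm]
      congr 1
      apply List.countP_congr
      intro p hp
      have hpx : p.1 ≠ x := by
        intro h
        exact hx ((contains_iff_mem_items thr x).mpr ⟨p.2, by simpa [← h] using hp⟩)
      unfold satB
      rw [List.count_append, show List.count p.1 [x] = 0 from by
        simp [List.count_singleton]; exact fun h => hpx h.symm]
      simp

theorem remE_inv (thr : PySem.Dict String Int) (hnd : thr.keys.Nodup)
    (win : List String) (st : PySem.Dict String Int × Int) (x : String)
    (h : InvD thr (x :: win) st) : InvD thr win (remE thr st x) := by
  obtain ⟨hc, hm⟩ := h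
  unfold remE
  by_cases hx : thr.contains x = true
  · rw [if_pos hx]
    constructor
    · intro k hk
      rw [PySem.Dict.getD_insert]
      by_cases hkx : k = x
      · subst hkx
        rw [if_pos rfl, hc k hx, List.count_cons_self]
        push_cast
        omega
      · rw [if_neg hkx, hc k hk, List.count_cons_of_ne (by exact fun h => hkx h.symm)]
    · obtain ⟨v, hv⟩ := (contains_iff_mem_items thr x).mp hx
      have hvv : thr.getD x 0 = v := PySem.Dict.getD_of_mem_items thr hv hnd 0
      have hsame : ∀ p ∈ thr.items, p.1 ≠ x → satB win p = satB (x :: win) p := by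
        intro p _ hpx
        unfold satB
        rw [List.count_cons_of_ne (by exact fun h => hpx h.symm)]
      rw [countP_point thr.items x v hnd hv (satB (x :: win)) (satB win) hsame, ← hm,
        hc x hx, hvv]
      unfold satB
      rw [List.count_cons_self]
      push_cast
      split_ifs with h1 h2 h3 <;> simp_all <;> omega
  · rw [if_neg hx]
    refine ⟨?_, ?_⟩
    · intro k hk
      have hkx : k ≠ x := fun h => hx (h ▸ hk)
      rw [hc k hk, List.count_cons_of_ne (by exact fun h => hkx h.symm)]
    · rw [hm]
      congr 1
      apply List.countP_congr
      intro p hp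
      have hpx : p.1 ≠ x := by
        intro h
        exact hx ((contains_iff_mem_items thr x).mpr ⟨p.2, by simpa [← h] using hp⟩)
      unfold satB
      rw [List.count_cons_of_ne (by exact fun h => hpx h.symm)]

theorem foldl_addE_inv (thr : PySem.Dict String Int) (hnd : thr.keys.Nodup) :
    ∀ (elems win : List String) (st : PySem.Dict String Int × Int),
      InvD thr win st → InvD thr (win ++ elems) (elems.foldl (addE thr) st) := by
  intro elems
  induction elems with
  | nil => intro win st h; simpa using h
  | cons e rest ih =>
    intro win st h
    rw [show win ++ e :: rest = (win ++ [e]) ++ rest by simp]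
    exact ih (win ++ [e]) (addE thr st e) (addE_inv thr hnd win st e h)

-- the threshold dict built from w.items lists exactly the (key, max(q,1)) pairs in order
theorem items_foldl_insert (f : String × Int → Int) :
    ∀ (ps : List (String × Int)) (d : PySem.Dict String Int),
      (ps.map (fun p => p.1)).Nodup → (∀ p ∈ ps, d.contains p.1 = false) →
      (ps.foldl (fun t p => t.insert p.1 (f p)) d).items
        = d.items ++ ps.map (fun p => (p.1, f p)) := by
  intro ps
  induction ps with
  | nil => intro d _ _; simp
  | cons p rest ih =>
    intro d hnd hni
    simp only [List.map_cons, List.nodup_cons] at hnd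
    obtain ⟨hp1, hnd'⟩ := hnd
    have hdp : d.contains p.1 = false := hni p (List.mem_cons_self)
    have hitems := PySem.Dict.items_insert_of_not_contains d (f p) hdp
    have hni' : ∀ q ∈ rest, (d.insert p.1 (f p)).contains q.1 = false := by
      intro q hq
      have hq1 : q.1 ≠ p.1 := by
        intro h
        exact hp1 (by simpa [← h] using List.mem_map_of_mem (f := fun p => p.1) hq)
      unfold PySem.Dict.contains at *
      rw [hitems, List.any_append]
      simp only [List.any_cons, List.any_nil, Bool.or_false]
      rw [hni q (List.mem_cons_of_mem _ hq)]
      simpa using fun h => hq1 h.symm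
    rw [List.foldl_cons, ih (d.insert p.1 (f p)) hnd' hni', hitems]
    simp

-- met == len(thr) decides exactly 'every thr entry is satisfied'
theorem met_eq_size (thr : PySem.Dict String Int) (win : List String) :
    (((thr.items.countP (satB win) : Nat) : Int) == ((PySem.Dict.size thr : Nat) : Int))
      = thr.items.all (satB win) := by
  unfold PySem.Dict.size
  by_cases h : ∀ p ∈ thr.items, satB win p = true
  · rw [List.countP_eq_length.mpr h]
    simp [List.all_eq_true.mpr h]
  · have h1 : thr.items.countP (satB win) ≠ thr.items.length :=
      fun hc => h (List.countP_eq_length.mp hc)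
    have h2 : thr.items.all (satB win) = false := by
      rw [← Bool.not_eq_true, List.all_eq_true]
      exact h
    rw [h2]
    exact beq_eq_false_iff_ne.mpr (fun hc => h1 (by exact_mod_cast hc))

-- the main sliding loop counts exactly the starts whose window satisfies every thr entry
theorem loop_inv (thr : PySem.Dict String Int) (hnd : thr.keys.Nodup)
    (discount : List String) :
    ∀ (m s : Nat), s + m = discount.length →
      ∀ (st : PySem.Dict String Int × Int) (answer : Int),
        InvD thr (winAt discount s) st →
        ((PySem.List.pyRange (s : Int) ((discount.length : Nat) : Int)).foldl
          (fun (acc : Int × (PySem.Dict String Int × Int)) t =>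
            (if acc.2.2 == ((PySem.Dict.size thr : Nat) : Int) then acc.1 + 1 else acc.1,
             if t + 10 < ((discount.length : Nat) : Int) then
               addE thr (remE thr acc.2 (PySem.List.pyGetD discount t ""))
                 (PySem.List.pyGetD discount (t + 10) "")
             else remE thr acc.2 (PySem.List.pyGetD discount t "")))
          (answer, st)).1
        = (PySem.List.pyRange (s : Int) ((discount.length : Nat) : Int)).foldl
            (fun a t => if thr.items.all (satB (winAt discount t.toNat)) then a + 1 else a)
            answer := by
  intro m
  induction m with
  | zero =>
    intro s hs st answer _
    have hnil : PySem.List.pyRange (s : Int) ((discount.length : Nat) : Int) = [] := by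
      apply List.eq_nil_of_length_eq_zero
      rw [PySem.List.length_pyRange_one]
      omega
    simp [hnil]
  | succ m ih =>
    intro s hs st answer hinv
    have hsn : s < discount.length := by omega
    rw [PySem.List.pyRange_one_cons (by exact_mod_cast hsn)]
    simp only [List.foldl_cons]
    obtain ⟨hcnt, hmet⟩ := hinv
    -- the answer update agrees
    have hans : (if st.2 == ((PySem.Dict.size thr : Nat) : Int) then answer + 1 else answer)
        = (if thr.items.all (satB (winAt discount ((s : Int)).toNat)) then answer + 1
           else answer) := by
      rw [hmet, show ((s : Int)).toNat = s from Int.toNat_natCast s, met_eq_size]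
    -- the head of the window is discount[s]
    have hslen : s < (discount.take (min (s + 10) discount.length)).length := by
      simp [List.length_take]
      omega
    have hhead : winAt discount s
        = discount[s] :: (discount.take (min (s + 10) discount.length)).drop (s + 1) := by
      unfold winAt
      rw [List.drop_eq_getElem_cons hslen, List.getElem_take]
    have hget : PySem.List.pyGetD discount (s : Int) "" = discount[s] := by
      rw [PySem.List.pyGetD_natCast, List.getD_eq_getElem _ _ hsn]
    have hrem : InvD thr ((discount.take (min (s + 10) discount.length)).drop (s + 1))
        (remE thr st (PySem.List.pyGetD discount (s : Int) "")) := by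
      rw [hget]
      exact remE_inv thr hnd _ st _ (by rw [← hhead]; exact ⟨hcnt, hmet⟩)
    have hnext : ∀ st', InvD thr (winAt discount (s + 1)) st' →
        ((PySem.List.pyRange ((s : Int) + 1) ((discount.length : Nat) : Int)).foldl
          (fun (acc : Int × (PySem.Dict String Int × Int)) t =>
            (if acc.2.2 == ((PySem.Dict.size thr : Nat) : Int) then acc.1 + 1 else acc.1,
             if t + 10 < ((discount.length : Nat) : Int) then
               addE thr (remE thr acc.2 (PySem.List.pyGetD discount t ""))
                 (PySem.List.pyGetD discount (t + 10) "")
             else remE thr acc.2 (PySem.List.pyGetD discount t "")))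
          ((if st.2 == ((PySem.Dict.size thr : Nat) : Int) then answer + 1 else answer),
           st')).1
        = (PySem.List.pyRange ((s : Int) + 1) ((discount.length : Nat) : Int)).foldl
            (fun a t => if thr.items.all (satB (winAt discount t.toNat)) then a + 1 else a)
            (if thr.items.all (satB (winAt discount ((s : Int)).toNat)) then answer + 1
             else answer) := by
      intro st' hst'
      rw [hans, show (s : Int) + 1 = ((s + 1 : Nat) : Int) from by push_cast; ring]
      exact ih (s + 1) (by omega) st' _ hst'
    by_cases hten : s + 10 < discount.length
    · have htenI : ((s : Int) + 10 < ((discount.length : Nat) : Int)) := by exact_mod_cast hten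
      rw [if_pos htenI]
      have hget10 : PySem.List.pyGetD discount ((s : Int) + 10) "" = discount[s + 10] := by
        rw [show (s : Int) + 10 = ((s + 10 : Nat) : Int) from by push_cast; ring,
          PySem.List.pyGetD_natCast, List.getD_eq_getElem _ _ hten]
      have hwin1 : winAt discount (s + 1)
          = (discount.take (min (s + 10) discount.length)).drop (s + 1) ++ [discount[s + 10]] := by
        unfold winAt
        rw [show min (s + 1 + 10) discount.length = s + 11 from by omega,
          show min (s + 10) discount.length = s + 10 from by omega]
        rw [show s + 11 = (s + 10) + 1 from rfl, List.take_add_one,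
          List.getElem?_eq_getElem hten]
        rw [List.drop_append_of_le_length (by simp [List.length_take]; omega)]
        rfl
      apply hnext
      rw [hwin1, hget10]
      exact addE_inv thr hnd _ _ _ hrem
    · have htenI : ¬ ((s : Int) + 10 < ((discount.length : Nat) : Int)) := by omega
      rw [if_neg htenI]
      have hwin1 : winAt discount (s + 1)
          = (discount.take (min (s + 10) discount.length)).drop (s + 1) := by
        unfold winAt
        rw [show min (s + 1 + 10) discount.length = discount.length from by omega,
          show min (s + 10) discount.length = discount.length from by omega]
      apply hnext
      rw [hwin1]
      exact hrem

-- A's per-key Counter test on the slice equals B's threshold test on the same window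
theorem perkey_eq (discount : List String) (sN : Nat) (hsN : sN < discount.length)
    (q : Int) (k : String) :
    ((PySem.Dict.counter (PySem.List.slice discount (some (sN : Int))
        (some (if (sN : Int) + 10 > PySem.List.len discount then PySem.List.len discount
               else (sN : Int) + 10)))).contains k
      && decide (q ≤ (PySem.Dict.counter (PySem.List.slice discount (some (sN : Int))
        (some (if (sN : Int) + 10 > PySem.List.len discount then PySem.List.len discount
               else (sN : Int) + 10)))).getD k 0))
    = satB (winAt discount sN) (k, max q 1) := by
  have hA : (if (sN : Int) + 10 > PySem.List.len discount then PySem.List.len discount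
      else (sN : Int) + 10) = ((min (sN + 10) discount.length : Nat) : Int) := by
    simp only [PySem.List.len]
    split_ifs with h <;> push_cast <;> omega
  rw [hA]
  have hslice : PySem.List.slice discount (some (sN : Int))
      (some ((min (sN + 10) discount.length : Nat) : Int)) = winAt discount sN := by
    unfold winAt
    rw [PySem.List.slice_natCast, List.take_drop,
      show sN + (min (sN + 10) discount.length - sN) = min (sN + 10) discount.length from by
        omega]
  rw [hslice, PySem.Dict.contains_counter, PySem.Dict.getD_counter]
  unfold satB
  have hmem : (winAt discount sN).contains k
      = decide (0 < List.count k (winAt discount sN)) := by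
    simp [List.count_pos_iff]
  rw [hmem]
  by_cases h1 : 0 < List.count k (winAt discount sN)
    <;> by_cases h2 : q ≤ (List.count k (winAt discount sN) : Int)
    <;> simp [h1, h2, ← List.count_pos_iff]

theorem all_ext {α : Type} (l : List α) (f g : α → Bool) (h : ∀ x, f x = g x) :
    l.all f = l.all g := by
  rw [funext h]

-- ===== VERDICT (by name: the statement is the Claim_ definition above) =====
theorem solution_spec : Claim_equal_solution := by
  intro want number discount _ hpre
  unfold Spec_solution solution solution_alt
  simp only []
  rw [dict_eq want number hpre]
  set w := PySem.Dict.ofList (want.zip number) with hw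
  set thr := w.items.foldl (fun (t : PySem.Dict String Int) p => t.insert p.1 (max p.2 1))
      PySem.Dict.empty with hthr
  -- thr's items are w's items with values clamped to ≥ 1
  have hwnd : (w.items.map (fun p => p.1)).Nodup := PySem.Dict.nodup_keys_ofList _
  have hthr_items : thr.items = w.items.map (fun p => (p.1, max p.2 1)) := by
    rw [hthr, items_foldl_insert (fun p => max p.2 1) w.items PySem.Dict.empty hwnd
      (by intro p _; rfl)]
    rfl
  have hthr_nd : thr.keys.Nodup := by
    unfold PySem.Dict.keys
    rw [hthr_items, List.map_map]
    exact hwnd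
  have hval1 : ∀ p ∈ thr.items, (1 : Int) ≤ p.2 := by
    intro p hp
    rw [hthr_items] at hp
    obtain ⟨q, _, rfl⟩ := List.mem_map.mp hp
    simp
  -- the initial fill loop establishes the invariant for the window of start 0
  have hm0 : min 10 ((discount.length : Nat) : Int) = ((min 10 discount.length : Nat) : Int) := by
    push_cast
    omega
  have hinit : InvD thr (winAt discount 0)
      ((PySem.List.pyRange 0 (min 10 (PySem.List.len discount))).foldl
        (fun st j => addE thr st (PySem.List.pyGetD discount j "")) (PySem.Dict.empty, 0)) := by
    have hcong : ∀ (st : PySem.Dict String Int × Int),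
        ∀ j ∈ PySem.List.pyRange 0 (min 10 (PySem.List.len discount)),
        addE thr st (PySem.List.pyGetD discount j "")
          = addE thr st (PySem.List.pyGetD (discount.take (min 10 discount.length)) j "") := by
      intro st j hj
      rw [PySem.List.mem_pyRange_one] at hj
      obtain ⟨h0, hlt⟩ := hj
      obtain ⟨jN, rfl⟩ := Int.eq_ofNat_of_zero_le h0
      simp only [PySem.List.len] at hlt
      have hjN : jN < min 10 discount.length := by exact_mod_cast (by omega : (jN : Int) < ((min 10 discount.length : Nat) : Int))
      simp only [PySem.List.pyGetD_natCast]
      rw [List.getD_eq_getElem _ _ (by omega : jN < discount.length),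
        List.getD_eq_getElem _ _ (by simpa [List.length_take] using hjN),
        List.getElem_take]
    rw [PySem.List.foldl_congr_mem _ _ _ _ hcong]
    have hlen10 : PySem.List.len discount = (discount.length : Int) := rfl
    have hminlen : min 10 (PySem.List.len discount)
        = PySem.List.len (discount.take (min 10 discount.length)) := by
      simp [PySem.List.len, List.length_take]
    rw [hminlen, PySem.List.foldl_pyRange_pyGetD (discount.take (min 10 discount.length)) ""
      (addE thr) (PySem.Dict.empty, 0) (le_refl 0)]
    have hbase : InvD thr [] ((PySem.Dict.empty : PySem.Dict String Int), (0 : Int)) := by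
      constructor
      · intro k _
        simp [PySem.Dict.getD_empty]
      · simp only
        rw [show thr.items.countP (satB []) = 0 from by
          rw [List.countP_eq_zero]
          intro p hp
          unfold satB
          have := hval1 p hp
          simp only [List.count_nil, Nat.cast_zero, decide_eq_true_eq]
          omega]
        rfl
    have := foldl_addE_inv thr hthr_nd (discount.take (min 10 discount.length)) [] _ hbase
    simpa [winAt, Int.toNat_zero] using this
  -- run the sliding loop against the simple per-start count
  have hloop := loop_inv thr hthr_nd discount discount.length 0 (by omega) _ 0 hinit
  refine Eq.trans ?_ hloop.symm
  -- and A's loop is that same per-start count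
  apply PySem.List.foldl_congr_mem
  intro acc s hs
  rw [PySem.List.mem_pyRange_one] at hs
  obtain ⟨h0, hlt⟩ := hs
  obtain ⟨sN, rfl⟩ := Int.eq_ofNat_of_zero_le h0
  have hsN : sN < discount.length := by
    simp only [PySem.List.len] at hlt
    exact_mod_cast hlt
  congr 1
  refine congrArg (fun b => b = true) ?_
  rw [checkA_eq_all, hthr_items, List.all_map, Int.toNat_natCast]
  refine all_ext _ _ _ ?_
  intro p
  simpa [Function.comp] using perkey_eq discount sN hsN p.2 p.1
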